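-- pv_equiv track=rewrite | github.com/jyosa/SNPs-analysis | hla2.py | concatenate_sequences_from_dict_list
-- ===== SOURCE A (Python) =====
-- def concatenate_sequences_from_dict_list(dict_list):
--     concatenated_sequences = {}  # Dictionary to hold concatenated sequences
--
--     # Process each dictionary in the list
--     for allele_dict in dict_list:
--         for allele, sequences in allele_dict.items():
--             # Concatenate sequences or initialize them in the dictionary
--             if allele not in concatenated_sequences:
--                 concatenated_sequences[allele] = sequences
--             else:
--                 concatenated_sequences[allele] += " " + sequences
--
--     return concatenated_sequences
-- ===== SOURCE B (Python) =====
-- def concatenate_sequences_from_dict_list(dict_list):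
--     # First pass: group every sequence under its allele, in insertion order.
--     groups = {}
--     for allele_dict in dict_list:
--         for allele, seq in allele_dict.items():
--             groups.setdefault(allele, []).append(seq)
--     # Second pass: join each group with single spaces.
--     return {allele: " ".join(parts) for allele, parts in groups.items()}
-- ===== Notes on version B (the rewrite author's own statement) =====
-- stated objective: idiomatic
-- what changed: B replaces A's in-place string concatenation per duplicate key with a two-pass group-then-join: first gather all sequences per allele into lists (setdefault/append), then build the result by ' '.join of each group.
import Mathlib
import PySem

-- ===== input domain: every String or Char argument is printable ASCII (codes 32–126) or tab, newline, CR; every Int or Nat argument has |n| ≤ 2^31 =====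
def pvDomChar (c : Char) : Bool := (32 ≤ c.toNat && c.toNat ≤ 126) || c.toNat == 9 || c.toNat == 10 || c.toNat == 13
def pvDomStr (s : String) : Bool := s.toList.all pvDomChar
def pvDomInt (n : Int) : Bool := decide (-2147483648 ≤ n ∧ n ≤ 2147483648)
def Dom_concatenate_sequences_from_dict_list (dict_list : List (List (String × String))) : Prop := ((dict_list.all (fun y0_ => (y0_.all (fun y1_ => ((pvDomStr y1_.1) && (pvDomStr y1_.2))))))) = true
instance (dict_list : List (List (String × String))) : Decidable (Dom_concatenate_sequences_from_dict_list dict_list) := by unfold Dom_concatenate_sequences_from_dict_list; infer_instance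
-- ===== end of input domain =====

-- B rewrites A's one-pass "concatenate-as-you-go" dict build as a two-pass
-- group-into-lists then " ".join per key (idiomatic; same return value).

-- ===== PORT A =====
-- A: one dict, initialized on first sight of a key, extended with " " + seq afterwards.
def concatenate_sequences_from_dict_list (dict_list : List (List (String × String))) : List (String × String) :=
  (dict_list.foldl
    (fun acc allele_dict =>
      (PySem.Dict.ofList allele_dict).items.foldl
        (fun acc p =>
          if acc.contains p.1 = false then acc.insert p.1 p.2
          else acc.modify p.1 "" (fun s => s ++ " " ++ p.2))
        acc)
    PySem.Dict.empty).items

-- ===== PORT B =====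
-- B: first pass groups sequences into lists per key (setdefault+append ≡ modify [] (· ++ [v])),
-- second pass joins each group with " ".
def concatenate_sequences_from_dict_list_alt (dict_list : List (List (String × String))) : List (String × String) :=
  (dict_list.foldl
    (fun groups allele_dict =>
      (PySem.Dict.ofList allele_dict).items.foldl
        (fun groups p => groups.modify p.1 [] (fun l => l ++ [p.2]))
        groups)
    PySem.Dict.empty).items.map (fun p => (p.1, PySem.Str.join " " p.2))

-- ===== PRECONDITION & SPEC =====
def Spec_concatenate_sequences_from_dict_list (dict_list : List (List (String × String))) (out : List (String × String)) : Prop := out = concatenate_sequences_from_dict_list_alt dict_list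
instance (dict_list : List (List (String × String))) (out : List (String × String)) : Decidable (Spec_concatenate_sequences_from_dict_list dict_list out) := by unfold Spec_concatenate_sequences_from_dict_list; infer_instance

-- ===== CLAIM (what is proved, stated in full; the proofs are below) =====
def Claim_equal_concatenate_sequences_from_dict_list : Prop := ∀ (dict_list : List (List (String × String))), Dom_concatenate_sequences_from_dict_list dict_list → Spec_concatenate_sequences_from_dict_list dict_list (concatenate_sequences_from_dict_list dict_list)

-- ===== LEMMAS AND PROOFS =====

-- " ".join: singleton and snoc (for a nonempty list) — list-of-chars intercalate facts lifted to String.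
theorem pvInterCC (sep x y : List Char) (ys : List (List Char)) :
    sep.intercalate (x :: y :: ys) = x ++ sep ++ sep.intercalate (y :: ys) := by
  simp [List.intercalate, List.intersperse]

theorem pvInterSnoc (sep b : List Char) : ∀ (as : List (List Char)), as ≠ [] →
    sep.intercalate (as ++ [b]) = sep.intercalate as ++ sep ++ b := by
  intro as h
  induction as with
  | nil => simp at h
  | cons x xs ih =>
    cases xs with
    | nil => simp [List.intercalate]
    | cons y ys =>
      have := ih (by simp)
      simp only [List.cons_append] at this ⊢
      rw [pvInterCC, pvInterCC]
      simp [this]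

theorem pvJoinSingleton (v : String) : PySem.Str.join " " [v] = v := by
  simp [PySem.Str.join, PySem.Chars.join, List.intercalate]

theorem pvJoinSnoc (l : List String) (v : String) (h : l ≠ []) :
    PySem.Str.join " " (l ++ [v]) = PySem.Str.join " " l ++ " " ++ v := by
  simp only [PySem.Str.join, PySem.Chars.join, List.map_append, List.map_cons, List.map_nil]
  rw [pvInterSnoc _ _ _ (by simpa using h)]
  rw [String.ofList_append, String.ofList_append, String.ofList_toList, String.ofList_toList]

-- The invariant relating A's accumulator d to B's accumulator g.
def pvRel (d : PySem.Dict String String) (g : PySem.Dict String (List String)) : Prop :=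
  g.keys.Nodup ∧ (∀ p ∈ g.items, p.2 ≠ []) ∧
    d.items = g.items.map (fun p => (p.1, PySem.Str.join " " p.2))

theorem pvRel_keys {d : PySem.Dict String String} {g : PySem.Dict String (List String)}
    (h : pvRel d g) : d.keys = g.keys := by
  obtain ⟨-, -, hit⟩ := h
  simp only [PySem.Dict.keys, hit, List.map_map]
  rfl

theorem pvRel_contains {d : PySem.Dict String String} {g : PySem.Dict String (List String)}
    (h : pvRel d g) (k : String) : d.contains k = g.contains k := by
  rw [PySem.Dict.contains_eq_decide_mem_keys, PySem.Dict.contains_eq_decide_mem_keys,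
    pvRel_keys h]

-- One step preserves the invariant.
theorem pvRel_step (d : PySem.Dict String String) (g : PySem.Dict String (List String))
    (p : String × String) (h : pvRel d g) :
    pvRel (if d.contains p.1 = false then d.insert p.1 p.2
           else d.modify p.1 "" (fun s => s ++ " " ++ p.2))
          (g.modify p.1 [] (fun l => l ++ [p.2])) := by
  obtain ⟨hnd, hne, hit⟩ := h
  obtain ⟨k, v⟩ := p
  by_cases hc : g.contains k = true
  · -- key already present: both sides overwrite in place
    have hdc : d.contains k = true := by rw [pvRel_contains ⟨hnd, hne, hit⟩]; exact hc
    -- the value currently stored under k in g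
    have hkmem : k ∈ g.keys := (PySem.Dict.contains_iff_mem_keys g k).mp hc
    obtain ⟨q, hq, hq1⟩ : ∃ q ∈ g.items, q.1 = k := by
      simpa [PySem.Dict.keys, List.mem_map] using hkmem
    have hgetg : g.getD k [] = q.2 :=
      PySem.Dict.getD_of_mem_items g (by rw [← hq1]; exact hq) hnd []
    have hdk : d.keys.Nodup := by rw [pvRel_keys ⟨hnd, hne, hit⟩]; exact hnd
    have hgetd : d.getD k "" = PySem.Str.join " " q.2 := by
      have hm : (k, PySem.Str.join " " q.2) ∈ d.items := by
        rw [hit]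
        exact List.mem_map.mpr ⟨q, hq, by rw [hq1]⟩
      exact PySem.Dict.getD_of_mem_items d hm hdk ""
    have hq2ne : q.2 ≠ [] := hne q hq
    simp only [hdc, Bool.true_eq_false, if_false, PySem.Dict.modify]
    refine ⟨?_, ?_, ?_⟩
    · rw [PySem.Dict.keys_insert_of_contains g _ hc]
      exact hnd
    · intro r hr
      rcases (PySem.Dict.mem_items_insert g _ _ r).mp hr with rfl | ⟨hr', -⟩
      · simp [hgetg]
      · exact hne r hr'
    · rw [PySem.Dict.items_insert_of_contains d _ hdc,
        PySem.Dict.items_insert_of_contains g _ hc, hit, List.map_map, List.map_map]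
      apply List.map_congr_left
      intro r hr
      rcases eq_or_ne r.1 k with h1 | h1
      · simp [h1, hgetg, hgetd, pvJoinSnoc q.2 v hq2ne]
      · simp [h1]
  · -- fresh key: both sides append a new entry
    have hc' : g.contains k = false := by simpa using hc
    have hdc : d.contains k = false := by rw [pvRel_contains ⟨hnd, hne, hit⟩]; exact hc'
    have hgetg : g.getD k [] = [] := PySem.Dict.getD_of_not_contains g [] hc' 
    simp only [hdc, if_true, PySem.Dict.modify, hgetg, List.nil_append]
    refine ⟨?_, ?_, ?_⟩
    · rw [PySem.Dict.keys_insert_of_not_contains g _ hc']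
      have hk : k ∉ g.keys := fun hk =>
        absurd ((PySem.Dict.contains_iff_mem_keys g k).mpr hk) (by simp [hc'])
      simp only [List.nodup_append, hnd, List.nodup_singleton, true_and]
      intro a ha b hb
      rw [List.mem_singleton] at hb
      exact fun hab => hk ((hab.trans hb) ▸ ha)
    · intro r hr
      rcases (PySem.Dict.mem_items_insert g _ _ r).mp hr with rfl | ⟨hr', -⟩
      · simp
      · exact hne r hr'
    · rw [PySem.Dict.items_insert_of_not_contains d _ hdc,
        PySem.Dict.items_insert_of_not_contains g _ hc', hit, List.map_append]
      simp [pvJoinSingleton]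

-- the inner fold over one allele_dict preserves the invariant
theorem pvRel_inner (ps : List (String × String)) :
    ∀ (d : PySem.Dict String String) (g : PySem.Dict String (List String)), pvRel d g →
    pvRel (ps.foldl (fun acc p =>
            if acc.contains p.1 = false then acc.insert p.1 p.2
            else acc.modify p.1 "" (fun s => s ++ " " ++ p.2)) d)
          (ps.foldl (fun groups p => groups.modify p.1 [] (fun l => l ++ [p.2])) g) := by
  induction ps with
  | nil => intro d g h; exact h
  | cons p ps ih =>
    intro d g h
    exact ih _ _ (pvRel_step d g p h)

-- the outer fold over the whole dict_list preserves the invariant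
theorem pvRel_outer (dict_list : List (List (String × String))) :
    ∀ (d : PySem.Dict String String) (g : PySem.Dict String (List String)), pvRel d g →
    pvRel (dict_list.foldl (fun acc allele_dict =>
            (PySem.Dict.ofList allele_dict).items.foldl (fun acc p =>
              if acc.contains p.1 = false then acc.insert p.1 p.2
              else acc.modify p.1 "" (fun s => s ++ " " ++ p.2)) acc) d)
          (dict_list.foldl (fun groups allele_dict =>
            (PySem.Dict.ofList allele_dict).items.foldl (fun groups p =>
              groups.modify p.1 [] (fun l => l ++ [p.2])) groups) g) := by
  induction dict_list with
  | nil => intro d g h; exact h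
  | cons ad rest ih =>
    intro d g h
    exact ih _ _ (pvRel_inner _ d g h)

theorem pvRel_empty : pvRel PySem.Dict.empty PySem.Dict.empty := by
  exact ⟨by simp [PySem.Dict.empty, PySem.Dict.keys], by simp [PySem.Dict.empty], rfl⟩

-- ===== VERDICT (by name: the statement is the Claim_ definition above) =====
theorem concatenate_sequences_from_dict_list_spec : Claim_equal_concatenate_sequences_from_dict_list := by
  intro dict_list _
  unfold Spec_concatenate_sequences_from_dict_list
  unfold concatenate_sequences_from_dict_list concatenate_sequences_from_dict_list_alt
  exact (pvRel_outer dict_list PySem.Dict.empty PySem.Dict.empty pvRel_empty).2.2
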